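-- pv_equiv track=rewrite | github.com/wonyk/AOC2022 | day25/snafu.py | calc_total
-- ===== SOURCE A (Python) =====
-- BASE_SNAFU = {"2": 2, "1": 1, "0": 0, "-": -1, "=": -2}
--
-- def calc_total(inp):
--     total = 0
--
--     for line in inp:
--         sum = 0
--         for c in line:
--             sum *= 5
--             sum += BASE_SNAFU[c]
--         total += sum
--
--     return total
-- ===== SOURCE B (Python) =====
-- BASE_SNAFU = {"2": 2, "1": 1, "0": 0, "-": -1, "=": -2}
--
-- def calc_total(inp):
--     total = 0
--     for line in inp:
--         total += sum(BASE_SNAFU[c] * 5 ** i for i, c in enumerate(reversed(line)))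
--     return total
-- ===== Notes on version B (the rewrite author's own statement) =====
-- stated objective: alternative
-- what changed: Each line is valued by positional weighting (digit * 5**i over the reversed string via enumerate) instead of Horner's running accumulator multiplied by 5 per step.
import Mathlib
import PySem

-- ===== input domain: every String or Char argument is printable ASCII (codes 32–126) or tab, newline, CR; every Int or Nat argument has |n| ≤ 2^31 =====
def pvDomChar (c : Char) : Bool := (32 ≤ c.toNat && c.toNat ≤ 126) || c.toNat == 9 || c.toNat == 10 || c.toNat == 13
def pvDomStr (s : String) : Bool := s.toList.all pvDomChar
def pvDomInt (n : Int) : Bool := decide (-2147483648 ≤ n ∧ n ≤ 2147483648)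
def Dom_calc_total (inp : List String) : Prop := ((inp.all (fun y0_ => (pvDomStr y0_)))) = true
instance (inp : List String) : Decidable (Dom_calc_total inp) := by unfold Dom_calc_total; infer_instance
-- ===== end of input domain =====

-- B values each line by positional weighting (digit * 5^i over the reversed line) instead of
-- A's Horner accumulator; same total, same cost (objective: alternative decomposition).

-- ===== PORT A =====
-- BASE_SNAFU = {"2": 2, "1": 1, "0": 0, "-": -1, "=": -2}  (keys are 1-char strings; ported over Char)
def baseSnafu : PySem.Dict Char Int :=
  PySem.Dict.ofList [('2', 2), ('1', 1), ('0', 0), ('-', -1), ('=', -2)]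

-- BASE_SNAFU[c]: KeyError (none) on unknown chars is excluded by Pre_; getD 0 only fills the hole.
def snafuVal (c : Char) : Int := (baseSnafu.get? c).getD 0

def calc_total (inp : List String) : Int :=
  inp.foldl (fun total line =>
    total + line.toList.foldl (fun sum c => sum * 5 + snafuVal c) 0) 0

-- ===== PORT B =====
def calc_total_alt (inp : List String) : Int :=
  inp.foldl (fun total line =>
    total + ((PySem.List.enumerate line.toList.reverse 0).map
      (fun p => snafuVal p.2 * 5 ^ p.1.toNat)).sum) 0

-- ===== PRECONDITION & SPEC =====
-- Pre_ excludes exactly the inputs where A raises KeyError: a character outside "210-=".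
def Pre_calc_total (inp : List String) : Prop :=
  (inp.all (fun line => line.toList.all (fun c => (baseSnafu.get? c).isSome))) = true
instance (inp : List String) : Decidable (Pre_calc_total inp) := by
  unfold Pre_calc_total; infer_instance
def pvWitness_calc_total : List String := ["1=", "22", ""]
def Spec_calc_total (inp : List String) (out : Int) : Prop := out = calc_total_alt inp
instance (inp : List String) (out : Int) : Decidable (Spec_calc_total inp out) := by
  unfold Spec_calc_total; infer_instance

-- ===== CLAIM (what is proved, stated in full; the proofs are below) =====
def Claim_equal_calc_total : Prop :=
  ∀ (inp : List String), Dom_calc_total inp → Pre_calc_total inp →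
    Spec_calc_total inp (calc_total inp)

-- ===== LEMMAS AND PROOFS =====

-- positional sum of a (reversed) digit list
def posSum (l : List Char) : Int :=
  ((PySem.List.enumerate l 0).map (fun p => snafuVal p.2 * 5 ^ p.1.toNat)).sum

theorem posSum_append_singleton (l : List Char) (c : Char) :
    posSum (l ++ [c]) = posSum l + snafuVal c * 5 ^ l.length := by
  unfold posSum
  rw [PySem.List.enumerate_append]
  simp [PySem.List.enumerate_cons]

theorem horner_eq_posSum (cs : List Char) (acc : Int) :
    cs.foldl (fun sum c => sum * 5 + snafuVal c) acc
      = acc * 5 ^ cs.length + posSum cs.reverse := by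
  induction cs generalizing acc with
  | nil => simp [posSum, PySem.List.enumerate_nil]
  | cons c rest ih =>
    simp only [List.foldl_cons, List.reverse_cons, List.length_cons]
    rw [ih, posSum_append_singleton]
    simp [List.length_reverse]
    ring

theorem calc_total_eq_alt (inp : List String) : calc_total inp = calc_total_alt inp := by
  unfold calc_total calc_total_alt
  induction inp using List.reverseRecOn with
  | nil => rfl
  | append_singleton xs x ih =>
    simp only [List.foldl_append, List.foldl_cons, List.foldl_nil, ih]
    rw [horner_eq_posSum]
    simp [posSum]

-- ===== VERDICT (by name: the statement is the Claim_ definition above) =====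
theorem calc_total_spec : Claim_equal_calc_total := by
  intro inp _ _
  exact calc_total_eq_alt inp
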